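-- pv_equiv track=rewrite | github.com/pr1m8/sqldbagent | src/sqldbagent/diagrams/service.py | _mermaid_data_type
-- ===== SOURCE A (Python) =====
-- def _mermaid_data_type(data_type: str) -> str:
--     """Normalize a reflected SQL type into a Mermaid-friendly token."""
--
--     normalized = "".join(
--         (character if character.isalnum() or character in {"_", "-"} else "_")
--         for character in data_type
--     )
--     normalized = normalized.upper().strip("_")
--     while "__" in normalized:
--         normalized = normalized.replace("__", "_")
--     normalized = normalized or "TYPE"
--     if not normalized[0].isalpha():
--         return f"TYPE_{normalized}"
--     return normalized
-- ===== SOURCE B (Python) =====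
-- def _mermaid_data_type(data_type: str) -> str:
--     """Normalize a reflected SQL type into a Mermaid-friendly token.
--
--     Single fused left-to-right pass: keep alnum/'-' chars uppercased, and emit
--     one '_' between kept groups (never leading or trailing), instead of
--     map-join + strip + repeated replace passes.
--     """
--     parts = []
--     pending = False
--     for character in data_type:
--         if character.isalnum() or character == "-":
--             if pending and parts:
--                 parts.append("_")
--             parts.append(character.upper())
--             pending = False
--         else:
--             pending = True
--     result = "".join(parts) or "TYPE"
--     if not result[0].isalpha():
--         return f"TYPE_{result}"
--     return result
-- ===== Notes on version B (the rewrite author's own statement) =====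
-- stated objective: simpler
-- what changed: Replaced A's multi-pass pipeline (per-char substitution join, uppercase, strip, and a repeated double-underscore-collapsing replace loop) by one fused left-to-right scan that uppercases kept characters and inserts a single separator between kept groups via a pending flag, never at the ends.
import Mathlib
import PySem

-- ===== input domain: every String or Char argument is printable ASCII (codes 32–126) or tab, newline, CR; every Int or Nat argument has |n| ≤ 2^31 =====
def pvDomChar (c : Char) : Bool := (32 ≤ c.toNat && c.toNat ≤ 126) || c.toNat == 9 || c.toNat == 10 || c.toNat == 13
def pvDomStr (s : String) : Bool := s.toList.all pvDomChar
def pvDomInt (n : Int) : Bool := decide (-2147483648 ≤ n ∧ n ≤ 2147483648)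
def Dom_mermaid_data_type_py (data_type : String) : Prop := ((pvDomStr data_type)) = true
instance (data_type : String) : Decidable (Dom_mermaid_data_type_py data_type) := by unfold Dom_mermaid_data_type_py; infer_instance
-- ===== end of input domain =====

-- B replaces A's map-join + strip('_') + repeated replace('__','_') passes by one fused
-- left-to-right scan with a pending-separator flag (objective: simpler, one pass).


-- ===== PORT A =====
-- (the lemmas pvHasDD_iff/pvRep_length_lt/pvReplace_eq are cited by pyCollapse's decreasing_by)
def pvRep : List Char → List Char
  | [] => []
  | [c] => [c]
  | a :: b :: t => if a == '_' && b == '_' then '_' :: pvRep t else a :: pvRep (b :: t)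

def pvHasDD : List Char → Bool
  | a :: b :: t => (a == '_' && b == '_') || pvHasDD (b :: t)
  | _ => false

theorem pvHasDD_iff (s : List Char) : pvHasDD s = true ↔ ['_','_'] <:+: s := by
  induction s with
  | nil => simp [pvHasDD]
  | cons a t ih =>
    cases t with
    | nil => simp [pvHasDD, List.infix_cons_iff, List.IsPrefix]
    | cons b u =>
      rw [List.infix_cons_iff]
      simp only [pvHasDD, Bool.or_eq_true, Bool.and_eq_true, beq_iff_eq, ih]
      constructor
      · rintro (⟨rfl, rfl⟩ | h)
        · exact Or.inl ⟨u, rfl⟩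
        · exact Or.inr h
      · rintro (⟨r, hr⟩ | h)
        · cases hr; exact Or.inl ⟨rfl, rfl⟩
        · exact Or.inr h

theorem pvRep_length_le (s : List Char) : (pvRep s).length ≤ s.length := by
  induction s using pvRep.induct with
  | case1 => simp [pvRep]
  | case2 c => simp [pvRep]
  | case3 a b t h ih => simp only [pvRep, h, if_true]; simpa using Nat.le_trans ih (by simp)
  | case4 a b t h ih => simp only [pvRep, h, if_false]; simpa using ih

theorem pvRep_length_lt (s : List Char) (h : pvHasDD s = true) : (pvRep s).length < s.length := by
  induction s using pvRep.induct with
  | case1 => simp [pvHasDD] at h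
  | case2 c => simp [pvHasDD] at h
  | case3 a b t hc ih =>
    simp only [pvRep, hc, if_true, List.length_cons]
    have := pvRep_length_le t; simp; omega
  | case4 a b t hc ih =>
    simp only [pvRep, hc, if_false, List.length_cons]
    simp only [pvHasDD, Bool.or_eq_true] at h
    rcases h with h | h
    · exact absurd h (by simpa using hc)
    · have := ih h; simpa using this

theorem pvReplace_go (fuel : Nat) (l acc : List Char) (h : l.length ≤ fuel) :
    PySem.Chars.replace.go ['_','_'] ['_'] fuel l acc = acc.reverse ++ pvRep l := by
  induction fuel generalizing l acc with
  | zero =>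
    have : l = [] := by cases l <;> simp_all
    subst this; simp [PySem.Chars.replace.go, pvRep]
  | succ n ih =>
    cases l with
    | nil => simp [PySem.Chars.replace.go, pvRep]
    | cons a t =>
      cases t with
      | nil =>
        rw [PySem.Chars.replace.go]
        simp only [List.isPrefixOf]
        simp [pvRep, ih [] (a :: acc) (by simp), PySem.Chars.replace.go]
      | cons b u =>
        rw [PySem.Chars.replace.go]
        by_cases hab : a = '_' ∧ b = '_'
        · obtain ⟨rfl, rfl⟩ := hab
          simp only [List.isPrefixOf, beq_self_eq_true, Bool.and_self, if_true,
            List.length_cons, List.drop_succ_cons, List.drop_zero, List.length_nil]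
          rw [ih u _ (by simp at h ⊢; omega)]
          simp [pvRep]
        · have hpre : ['_','_'].isPrefixOf (a :: b :: u) = false := by
            simp [List.isPrefixOf]; intro ha hb; exact hab ⟨ha.symm, hb.symm⟩
          rw [hpre]
          simp only [if_false, Bool.false_eq_true]
          rw [ih (b :: u) _ (by simp at h ⊢; omega)]
          simp [pvRep]
          intro ha hb; exact absurd ⟨ha, hb⟩ hab

theorem pvReplace_eq (s : List Char) : PySem.Chars.replace s ['_','_'] ['_'] = pvRep s := by
  rw [PySem.Chars.replace]
  simp [pvReplace_go s.length s [] le_rfl]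

-- while "__" in normalized: normalized = normalized.replace("__", "_")
def pyCollapse (s : List Char) : List Char :=
  if PySem.Chars.isIn ['_','_'] s then pyCollapse (PySem.Chars.replace s ['_','_'] ['_']) else s
termination_by s.length
decreasing_by
  rw [pvReplace_eq]
  exact pvRep_length_lt s ((pvHasDD_iff s).2 ((PySem.Chars.isIn_iff_infix _ _).1 ‹_›))

def mermaid_data_type_py (data_type : String) : String :=
  let normalized0 := PySem.Chars.join []
    (data_type.toList.map (fun character =>
      if PySem.Chars.isalnum character || ['_','-'].contains character then [character] else ['_']))
  let normalized1 := PySem.Chars.stripChars (PySem.Chars.upper normalized0) ['_']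
  let normalized2 := pyCollapse normalized1
  let normalized3 := if normalized2.isEmpty then "TYPE".toList else normalized2
  if !(PySem.Chars.isalpha (normalized3.headD ' ')) then String.mk ("TYPE_".toList ++ normalized3)
  else String.mk normalized3

-- ===== PORT B =====
def altScan : List Char → List Char → Bool → List Char
  | [], acc, _ => acc.reverse
  | c :: t, acc, pending =>
    if PySem.Chars.isalnum c || c == '-' then
      altScan t (PySem.Chars.upperChar c :: (if pending && !acc.isEmpty then '_' :: acc else acc)) false
    else altScan t acc true

def mermaid_data_type_py_alt (data_type : String) : String :=
  let core := altScan data_type.toList [] false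
  let result := if core.isEmpty then "TYPE".toList else core
  if !(PySem.Chars.isalpha (result.headD ' ')) then String.mk ("TYPE_".toList ++ result)
  else String.mk result

-- ===== PRECONDITION & SPEC =====
def Spec_mermaid_data_type_py (data_type : String) (out : String) : Prop := out = mermaid_data_type_py_alt data_type
instance (data_type : String) (out : String) : Decidable (Spec_mermaid_data_type_py data_type out) := by unfold Spec_mermaid_data_type_py; infer_instance

-- ===== CLAIM (what is proved, stated in full; the proofs are below) =====
def Claim_equal_mermaid_data_type_py : Prop := ∀ (data_type : String), Dom_mermaid_data_type_py data_type → Spec_mermaid_data_type_py data_type (mermaid_data_type_py data_type)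

-- ===== LEMMAS AND PROOFS =====
def pvSqueeze : List Char → List Char
  | [] => []
  | [c] => [c]
  | a :: b :: t => if a == '_' && b == '_' then pvSqueeze (b :: t) else a :: pvSqueeze (b :: t)

def pvP (c : Char) : Bool := (['_'] : List Char).contains c

def pvRstrip (m : List Char) : List Char := (List.dropWhile pvP m.reverse).reverse

mutual
def pvMid : List Char → List Char
  | [] => []
  | c :: t => if c == '_' then pvSep t else c :: pvMid t
def pvSep : List Char → List Char
  | [] => []
  | c :: t => if c == '_' then pvSep t else '_' :: c :: pvMid t
end

def pvG (c : Char) : Char := if PySem.Chars.isalnum c || c == '-' then PySem.Chars.upperChar c else '_'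

theorem pvP_eq (c : Char) : pvP c = (c == '_') := by
  simp only [pvP, List.contains_cons, List.contains_nil, Bool.or_false]

theorem pvSqueeze_cons (a : Char) (l : List Char) :
    pvSqueeze (a :: l) = if a == '_' && l.headD ' ' == '_' then pvSqueeze l else a :: pvSqueeze l := by
  cases l with
  | nil => simp [pvSqueeze]
  | cons d u => simp only [pvSqueeze, List.headD_cons]; rfl

theorem pvRep_headD (l : List Char) (x : Char) : (pvRep l).headD x = l.headD x := by
  induction l using pvRep.induct with
  | case1 => simp [pvRep]
  | case2 c => simp [pvRep]
  | case3 a b t h ih => simp only [pvRep, h, if_true]; simp at h ⊢; exact h.1.symm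
  | case4 a b t h ih => simp [pvRep, h]

theorem pvSqueeze_pvRep (s : List Char) : pvSqueeze (pvRep s) = pvSqueeze s := by
  induction s using pvRep.induct with
  | case1 => simp [pvRep]
  | case2 c => simp [pvRep]
  | case3 a b t h ih =>
    simp only [pvRep, h, if_true]
    simp only [beq_iff_eq, Bool.and_eq_true] at h
    obtain ⟨rfl, rfl⟩ := h
    rw [pvSqueeze_cons '_' (pvRep t), pvRep_headD t ' ', ih, ← pvSqueeze_cons '_' t]
    simp [pvSqueeze]
  | case4 a b t h ih =>
    have e : pvRep (a :: b :: t) = a :: pvRep (b :: t) := by simp [pvRep, h]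
    rw [e, pvSqueeze_cons a (pvRep (b :: t)), pvRep_headD (b :: t) ' ', ih,
      ← pvSqueeze_cons a (b :: t)]

theorem pvSqueeze_of_not_hasDD (s : List Char) (h : pvHasDD s = false) : pvSqueeze s = s := by
  induction s using pvSqueeze.induct with
  | case1 => simp [pvSqueeze]
  | case2 c => simp [pvSqueeze]
  | case3 a b t hc ih =>
    simp only [pvHasDD, Bool.or_eq_false_iff] at h
    exact absurd hc (by simp [h.1])
  | case4 a b t hc ih =>
    simp only [pvHasDD, Bool.or_eq_false_iff] at h
    simp only [pvSqueeze]
    rw [if_neg hc, ih h.2]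

theorem pyCollapse_eq (s : List Char) : pyCollapse s = pvSqueeze s := by
  induction s using pyCollapse.induct with
  | case1 s h ih =>
    rw [pyCollapse, if_pos h, ih, pvReplace_eq, pvSqueeze_pvRep]
  | case2 s h =>
    rw [pyCollapse, if_neg h]
    have hdd : pvHasDD s = false := by
      rcases Bool.eq_false_or_eq_true (pvHasDD s) with ht | hf
      · exact absurd ((PySem.Chars.isIn_iff_infix _ _).2 ((pvHasDD_iff s).1 ht)) h
      · exact hf
    exact (pvSqueeze_of_not_hasDD s hdd).symm

theorem pvRstrip_cons (c : Char) (t : List Char) :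
    pvRstrip (c :: t) =
      if pvRstrip t = [] then (if pvP c then [] else [c]) else c :: pvRstrip t := by
  simp only [pvRstrip, List.reverse_cons, List.dropWhile_append]
  by_cases h : List.dropWhile pvP t.reverse = []
  · simp [h]
    by_cases hc : pvP c <;> simp [List.dropWhile, hc]
  · simp [h, List.isEmpty_iff, List.reverse_eq_nil_iff]

theorem pvMidSep_eq (t : List Char) :
    pvMid t = pvSqueeze (pvRstrip t) ∧
      pvSep t = (if pvRstrip t = [] then [] else pvSqueeze ('_' :: pvRstrip t)) := by
  induction t with
  | nil => simp [pvMid, pvSep, pvRstrip, pvSqueeze]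
  | cons c u ih =>
    obtain ⟨ihm, ihs⟩ := ih
    by_cases hc : c = '_'
    · subst hc
      constructor
      · rw [show pvMid ('_' :: u) = pvSep u from by simp [pvMid]]
        rw [pvRstrip_cons]
        by_cases hu : pvRstrip u = []
        · simp [hu, pvP_eq, pvSqueeze, ihs]
        · simp only [hu, if_false, ihs, pvP_eq]
      · rw [show pvSep ('_' :: u) = pvSep u from by simp [pvSep]]
        rw [pvRstrip_cons]
        by_cases hu : pvRstrip u = []
        · simp [hu, pvP_eq, ihs]
        · simp only [hu, if_false, ihs, pvP_eq, beq_self_eq_true, if_true]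
          rw [show pvSqueeze ('_' :: '_' :: pvRstrip u) = pvSqueeze ('_' :: pvRstrip u) from by
            simp [pvSqueeze]]
          simp
    · have hcb : (c == '_') = false := by simp [hc]
      constructor
      · rw [show pvMid (c :: u) = c :: pvMid u from by simp [pvMid, hc]]
        rw [pvRstrip_cons]
        by_cases hu : pvRstrip u = []
        · simp [hu, pvP_eq, hcb, pvSqueeze, ihm]
        · simp only [hu, if_false]
          rw [pvSqueeze_cons c (pvRstrip u), ihm]
          simp [hcb]
      · rw [show pvSep (c :: u) = '_' :: c :: pvMid u from by simp [pvSep, hc]]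
        rw [pvRstrip_cons]
        by_cases hu : pvRstrip u = []
        · simp [hu, pvP_eq, hcb, pvSqueeze, ihm]
        · simp only [hu, if_false, pvP_eq, hcb]
          rw [show pvSqueeze ('_' :: c :: pvRstrip u) = '_' :: pvSqueeze (c :: pvRstrip u) from by
            simp [pvSqueeze, hcb]]
          rw [pvSqueeze_cons c (pvRstrip u), ihm]
          simp [hcb]

theorem pvUpper_ne (c : Char) (h : (PySem.Chars.isalnum c || c == '-') = true) :
    PySem.Chars.upperChar c ≠ '_' := by
  have hv : ∀ d e : Char, d ≤ e ↔ d.toNat ≤ e.toNat := by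
    intro d e; rw [Char.le_def, UInt32.le_iff_toNat_le]; rfl
  simp only [PySem.Chars.isalnum, PySem.Chars.isalpha, PySem.Chars.isupper, PySem.Chars.islower,
    PySem.Chars.isdigit, PySem.Chars.upperChar, Bool.or_eq_true, Bool.and_eq_true,
    decide_eq_true_eq, beq_iff_eq] at h ⊢
  intro heq
  split at heq
  · rename_i hl
    rw [hv, hv] at hl
    have h97 : (97:Nat) ≤ c.toNat := hl.1
    have h122 : c.toNat ≤ 122 := hl.2
    have hval : (Char.ofNat (c.toNat - 32)).toNat = c.toNat - 32 := by
      rw [Char.toNat_ofNat, if_pos]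
      left; omega
    have h95 : (Char.ofNat (c.toNat - 32)).toNat = ('_').toNat := by rw [heq]
    rw [hval] at h95
    have : c.toNat - 32 = 95 := h95
    omega
  · subst heq
    rcases h with ((⟨h1,h2⟩|⟨h1,h2⟩)|⟨h1,h2⟩) | h1
    · rw [hv] at h1 h2; revert h1 h2; decide
    · rw [hv] at h1 h2; revert h1 h2; decide
    · rw [hv] at h1 h2; revert h1 h2; decide
    · revert h1; decide

theorem pvMap_eq (c : Char) :
    PySem.Chars.upperChar
        (if PySem.Chars.isalnum c || ['_','-'].contains c then c else '_') = pvG c := by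
  simp only [pvG, List.contains_cons, List.contains_nil, Bool.or_false]
  by_cases h1 : (PySem.Chars.isalnum c || c == '-') = true
  · have h2 : (PySem.Chars.isalnum c || (c == '_' || c == '-')) = true := by
      simp only [Bool.or_eq_true] at h1 ⊢
      rcases h1 with h | h
      · exact Or.inl h
      · exact Or.inr (Or.inr h)
    rw [if_pos h2, if_pos h1]
  · rw [if_neg h1]
    by_cases hu : c = '_'
    · subst hu; decide
    · have h2 : (PySem.Chars.isalnum c || (c == '_' || c == '-')) = false := by
        simp only [Bool.or_eq_true, not_or, beq_iff_eq] at h1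
        simp [h1.1, h1.2, hu]
      simp [h2]
      decide

theorem portA_core (l : List Char) :
    pyCollapse (PySem.Chars.stripChars
        (PySem.Chars.upper (PySem.Chars.join []
          (l.map (fun character =>
            if PySem.Chars.isalnum character || ['_','-'].contains character
            then [character] else ['_'])))) ['_'])
      = pvMid (List.dropWhile pvP (l.map pvG)) := by
  have hjoin : PySem.Chars.join []
      (l.map (fun character =>
        if PySem.Chars.isalnum character || ['_','-'].contains character
        then [character] else ['_']))
      = l.map (fun character =>
        if PySem.Chars.isalnum character || ['_','-'].contains character
        then character else '_') := by
    rw [show (l.map (fun character =>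
        if PySem.Chars.isalnum character || ['_','-'].contains character
        then [character] else ['_']))
      = (l.map (fun character =>
          if PySem.Chars.isalnum character || ['_','-'].contains character
          then character else '_')).map (fun x => [x]) from by
        rw [List.map_map]; congr 1; funext c; simp only [Function.comp]; split <;> rfl]
    exact PySem.Chars.join_nil_singletons _
  rw [hjoin]
  have hupper : PySem.Chars.upper
      (l.map (fun character =>
        if PySem.Chars.isalnum character || ['_','-'].contains character
        then character else '_')) = l.map pvG := by
    simp only [PySem.Chars.upper, List.map_map]
    congr 1; funext c; exact pvMap_eq c
  rw [hupper]
  rw [show PySem.Chars.stripChars (l.map pvG) ['_'] = pvRstrip (List.dropWhile pvP (l.map pvG)) from rfl]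
  rw [pyCollapse_eq]
  exact (pvMidSep_eq (List.dropWhile pvP (l.map pvG))).1.symm

theorem altScan_inv (t : List Char) : ∀ (acc : List Char) (pending : Bool),
    altScan t acc pending = acc.reverse ++
      (if acc.isEmpty then pvMid (List.dropWhile pvP (t.map pvG))
       else if pending then pvSep (t.map pvG) else pvMid (t.map pvG)) := by
  induction t with
  | nil =>
    intro acc pending
    simp [altScan, pvMid, pvSep]
  | cons c u ih =>
    intro acc pending
    by_cases hs : (PySem.Chars.isalnum c || c == '-') = true
    · have hg : pvG c = PySem.Chars.upperChar c := by simp [pvG, hs]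
      have hne : (PySem.Chars.upperChar c == '_') = false := by
        simp [pvUpper_ne c hs]
      rw [show altScan (c :: u) acc pending
          = altScan u (PySem.Chars.upperChar c ::
              (if pending && !acc.isEmpty then '_' :: acc else acc)) false from by
        simp [altScan, hs]]
      rw [ih]
      simp only [List.map_cons, hg, List.dropWhile_cons, pvP_eq, hne, Bool.false_eq_true,
        if_false, List.isEmpty_cons]
      rw [show pvMid (PySem.Chars.upperChar c :: u.map pvG)
          = PySem.Chars.upperChar c :: pvMid (u.map pvG) from by
        simp [pvMid, hne]]
      by_cases ha : acc = []
      · subst ha; simp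
      · have ha' : acc.isEmpty = false := by simp [ha]
        cases pending <;> simp [ha', ha, pvSep, hne]
    · have hg : pvG c = '_' := by simp [pvG, hs]
      rw [show altScan (c :: u) acc pending = altScan u acc true from by simp [altScan, hs]]
      rw [ih]
      simp only [List.map_cons, hg, List.dropWhile_cons, pvP_eq, beq_self_eq_true, if_true]
      rw [show pvMid ('_' :: u.map pvG) = pvSep (u.map pvG) from by simp [pvMid]]
      rw [show pvSep ('_' :: u.map pvG) = pvSep (u.map pvG) from by simp [pvSep]]
      by_cases ha : acc.isEmpty = true <;> cases pending <;> simp [ha]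

theorem pvPorts_eq (data_type : String) :
    mermaid_data_type_py data_type = mermaid_data_type_py_alt data_type := by
  simp only [mermaid_data_type_py, mermaid_data_type_py_alt]
  rw [portA_core, altScan_inv]
  simp

-- ===== VERDICT (by name: the statement is the Claim_ definition above) =====
theorem mermaid_data_type_py_spec : Claim_equal_mermaid_data_type_py := by
  intro data_type _hdom
  exact pvPorts_eq data_type
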